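-- pv_equiv track=rewrite | github.com/alp-kudzai/MIT-CS-Assignments | ps3.py | update_hand
-- ===== SOURCE A (Python) =====
-- def update_hand(hand, word):
--     """
--     Does NOT assume that hand contains every letter in word at least as
--     many times as the letter appears in word. Letters in word that don't
--     appear in hand should be ignored. Letters that appear in word more times
--     than in hand should never result in a negative count; instead, set the
--     count in the returned hand to 0 (or remove the letter from the
--     dictionary, depending on how your code is structured).
--
--     Updates the hand: uses up the letters in the given word
--     and returns the new hand, without those letters in it.
--
--     Has no side effects: does not modify hand.
--
--     word: string
--     hand: dictionary (string -> int)
--     returns: dictionary (string -> int)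
--     """
--     chand = hand.copy()
--     for c in word:
--         c = c.lower()
--         if c not in chand:
--             pass
--         elif chand[c] > 1:
--             chand[c] = chand[c] - 1
--         else:
--             chand.pop(c,0)
--
--     return chand
-- ===== SOURCE B (Python) =====
-- def update_hand(hand, word):
--     counts = {}
--     for c in word.lower():
--         counts[c] = counts.get(c, 0) + 1
--     result = dict(hand)
--     for letter, k in counts.items():
--         if letter in result:
--             v = result[letter] - k
--             if v > 0:
--                 result[letter] = v
--             else:
--                 result.pop(letter)
--     return result
-- ===== Notes on version B (the rewrite author's own statement) =====
-- stated objective: alternative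
-- what changed: B first builds a frequency table of the lowercased word, then makes one pass over the distinct (letter, count) pairs doing a single clamped subtraction per letter, instead of A's per-character decrement-and-pop loop.
import Mathlib
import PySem

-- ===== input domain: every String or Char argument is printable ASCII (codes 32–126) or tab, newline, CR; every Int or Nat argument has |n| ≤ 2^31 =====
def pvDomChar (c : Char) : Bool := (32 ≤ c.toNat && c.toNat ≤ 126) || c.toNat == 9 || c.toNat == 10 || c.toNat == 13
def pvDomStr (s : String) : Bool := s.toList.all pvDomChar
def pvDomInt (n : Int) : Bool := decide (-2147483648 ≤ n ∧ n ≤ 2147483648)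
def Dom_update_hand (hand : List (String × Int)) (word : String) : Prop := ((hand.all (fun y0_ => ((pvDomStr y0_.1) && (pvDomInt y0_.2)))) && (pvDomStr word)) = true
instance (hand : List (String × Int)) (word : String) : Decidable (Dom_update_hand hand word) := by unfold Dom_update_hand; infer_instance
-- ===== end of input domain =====

-- B replaces A's per-character decrement-and-pop loop by a frequency table of the word
-- followed by one clamped subtraction per distinct letter (objective: alternative).

-- ===== PORT A =====
-- body of A's for-loop (the caller passes c = c.lower() already applied)
def pvStepA_update_hand (chand : PySem.Dict String Int) (c : String) : PySem.Dict String Int :=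
  if chand.contains c = false then chand                                -- if c not in chand: pass
  else if chand.getD c 0 > 1 then chand.insert c (chand.getD c 0 - 1)   -- chand[c] = chand[c] - 1
  else chand.erase c                                                    -- chand.pop(c, 0)

def update_hand (hand : List (String × Int)) (word : String) : List (String × Int) :=
  let chand := PySem.Dict.ofList hand                                   -- chand = hand.copy()
  (word.toList.foldl
    (fun d ch => pvStepA_update_hand d (String.ofList (PySem.Chars.lower [ch])))  -- for c in word: c = c.lower()
    chand).items

-- ===== PORT B =====
-- body of B's for-loop over counts.items(): p = (letter, k)
def pvStepB_update_hand (r : PySem.Dict String Int) (p : String × Int) : PySem.Dict String Int :=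
  if r.contains p.1 then                                                -- if letter in result:
    let v := r.getD p.1 0 - p.2                                         --   v = result[letter] - k
    if v > 0 then r.insert p.1 v                                        --   result[letter] = v
    else r.erase p.1                                                    --   result.pop(letter)
  else r

def update_hand_alt (hand : List (String × Int)) (word : String) : List (String × Int) :=
  let counts := (PySem.Str.lower word).toList.foldl                     -- for c in word.lower(): counts[c] = counts.get(c,0)+1
    (fun d ch => d.insert (String.ofList [ch]) (d.getD (String.ofList [ch]) 0 + 1)) PySem.Dict.empty
  let result := PySem.Dict.ofList hand                                  -- result = dict(hand)
  (counts.items.foldl pvStepB_update_hand result).items                 -- for letter, k in counts.items(): …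

-- ===== PRECONDITION & SPEC =====
def Spec_update_hand (hand : List (String × Int)) (word : String) (out : List (String × Int)) : Prop := out = update_hand_alt hand word
instance (hand : List (String × Int)) (word : String) (out : List (String × Int)) : Decidable (Spec_update_hand hand word out) := by unfold Spec_update_hand; infer_instance

-- ===== CLAIM (what is proved, stated in full; the proofs are below) =====
def Claim_equal_update_hand : Prop := ∀ (hand : List (String × Int)) (word : String), Dom_update_hand hand word → Spec_update_hand hand word (update_hand hand word)

-- ===== LEMMAS AND PROOFS =====

-- the common shape of both loop bodies: clamped removal of t copies of letter c
def pvAdj (d : PySem.Dict String Int) (c : String) (t : Int) : PySem.Dict String Int :=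
  if d.contains c = false then d
  else if d.getD c 0 - t > 0 then d.insert c (d.getD c 0 - t)
  else d.erase c

theorem pvStepA_eq (d : PySem.Dict String Int) (c : String) :
    pvStepA_update_hand d c = pvAdj d c 1 := by
  unfold pvStepA_update_hand pvAdj
  split_ifs with h1 h2 h3 <;> first | rfl | omega

theorem pvStepB_eq (r : PySem.Dict String Int) (p : String × Int) :
    pvStepB_update_hand r p = pvAdj r p.1 p.2 := by
  unfold pvStepB_update_hand pvAdj
  split_ifs with h1 h2 h3 <;> first | rfl | (simp_all)

theorem pvAdj_nodup (d : PySem.Dict String Int) (c : String) (t : Int)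
    (h : d.keys.Nodup) : (pvAdj d c t).keys.Nodup := by
  unfold pvAdj
  split_ifs with h1 h2
  · exact h
  · exact PySem.Dict.nodup_keys_insert _ _ _ h
  · simp only [PySem.Dict.erase, PySem.Dict.keys]
    exact h.sublist (List.Sublist.map _ List.filter_sublist)

-- the workhorse: how one pvAdj step commutes with a filterMap of the items
theorem pvAdj_filterMap (d : PySem.Dict String Int) (h : d.keys.Nodup) (c : String) (t : Int)
    (g : String × Int → Option (String × Int)) :
    (pvAdj d c t).items.filterMap g
      = d.items.filterMap (fun p => if p.1 = c then (if p.2 - t > 0 then g (c, p.2 - t) else none) else g p) := by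
  unfold pvAdj
  split_ifs with h1 h2
  · refine List.filterMap_congr (fun p hp => ?_)
    have hne : p.1 ≠ c := by
      intro he
      have : d.contains c = true := by
        rw [PySem.Dict.contains_iff_mem_keys]
        exact he ▸ PySem.Dict.mem_keys_of_mem_items d hp
      simp [this] at h1
    simp [hne]
  · rw [PySem.Dict.items_insert_of_contains d _ (by simpa using h1), List.filterMap_map]
    refine List.filterMap_congr (fun p hp => ?_)
    by_cases he : p.1 = c
    · have hv : p.2 = d.getD c 0 :=
        (PySem.Dict.getD_of_mem_items d (he ▸ hp) h 0).symm
      have h2' : t < p.2 := by omega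
      simp [Function.comp, he, ← hv, h2']
    · simp [Function.comp, he]
  · simp only [PySem.Dict.erase, List.filterMap_filter]
    refine List.filterMap_congr (fun p hp => ?_)
    by_cases he : p.1 = c
    · have hv : p.2 = d.getD c 0 :=
        (PySem.Dict.getD_of_mem_items d (he ▸ hp) h 0).symm
      have h2' : ¬ t < p.2 := by omega
      simp [he, h2']
    · simp [he]

-- A's loop computes a filterMap by the multiplicity of each key in the processed list
theorem foldA (ws : List String) :
    ∀ d : PySem.Dict String Int, d.keys.Nodup →
    (ws.foldl (fun d c => pvAdj d c 1) d).items
      = d.items.filterMap (fun p =>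
          if (ws.count p.1 : Int) = 0 ∨ (ws.count p.1 : Int) < p.2
          then some (p.1, p.2 - (ws.count p.1 : Int)) else none) := by
  induction ws with
  | nil =>
    intro d _
    simp
  | cons c ws ih =>
    intro d h
    rw [List.foldl_cons, ih _ (pvAdj_nodup d c 1 h), pvAdj_filterMap d h c 1]
    refine List.filterMap_congr (fun p hp => ?_)
    obtain ⟨a, b⟩ := p
    by_cases he : a = c
    · subst he
      have hc : ((a :: ws).count a : Int) = (ws.count a : Int) + 1 := by
        simp
      simp only [hc]
      split_ifs <;>
        first
        | rfl
        | omega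
        | (simp only [Option.some.injEq, Prod.mk.injEq, true_and]; omega)
    · have hc : ((c :: ws).count a : Int) = (ws.count a : Int) := by
        have hne : ¬ c = a := fun h' => he h'.symm
        simp [hne]
      simp only [if_neg he, hc]

-- B's loop over distinct keys computes a filterMap guarded by membership
theorem foldB (m : String → Int) (K : List String) :
    ∀ r : PySem.Dict String Int, K.Nodup → r.keys.Nodup →
    ((K.map (fun k => (k, m k))).foldl (fun r p => pvAdj r p.1 p.2) r).items
      = r.items.filterMap (fun p =>
          if p.1 ∈ K then (if p.2 - m p.1 > 0 then some (p.1, p.2 - m p.1) else none) else some p) := by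
  induction K with
  | nil =>
    intro r _ _
    simp
  | cons k K ih =>
    intro r hK h
    rw [List.map_cons, List.foldl_cons, ih _ (List.nodup_cons.mp hK).2 (pvAdj_nodup r k (m k) h),
        pvAdj_filterMap r h k (m k)]
    refine List.filterMap_congr (fun p hp => ?_)
    obtain ⟨a, b⟩ := p
    by_cases he : a = k
    · subst he
      have hnk : a ∉ K := (List.nodup_cons.mp hK).1
      simp [hnk]
    · simp [he]

-- ===== VERDICT (by name: the statement is the Claim_ definition above) =====
theorem update_hand_spec : Claim_equal_update_hand := by
  intro hand word _
  unfold Spec_update_hand update_hand update_hand_alt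
  simp only [pvStepA_eq, PySem.Str.toList_lower, PySem.Chars.lower,
    List.map_cons, List.map_nil]
  rw [← List.foldl_map (f := fun ch : Char => String.ofList [PySem.Chars.lowerChar ch])
        (g := fun (d : PySem.Dict String Int) (c : String) => pvAdj d c 1)
        (l := word.toList) (init := PySem.Dict.ofList hand),
      ← List.foldl_map (f := fun ch : Char => String.ofList [ch])
        (g := fun (d : PySem.Dict String Int) (x : String) => d.insert x (d.getD x 0 + 1))
        (l := List.map PySem.Chars.lowerChar word.toList) (init := PySem.Dict.empty),
      List.map_map,
      PySem.Dict.foldl_insert_getD_add_one_eq_counter, PySem.Dict.items_counter]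
  simp only [Function.comp_def]
  set ws := word.toList.map (fun ch => String.ofList [PySem.Chars.lowerChar ch]) with hws
  rw [foldA ws _ (PySem.Dict.nodup_keys_ofList hand)]
  have hB : pvStepB_update_hand = fun (r : PySem.Dict String Int) (p : String × Int) => pvAdj r p.1 p.2 :=
    funext fun r => funext fun p => pvStepB_eq r p
  rw [hB]
  rw [foldB (fun k => (List.count k ws : Int)) (PySem.Set.ofList ws) _
        (PySem.Set.nodup_ofList ws) (PySem.Dict.nodup_keys_ofList hand)]
  refine List.filterMap_congr (fun p hp => ?_)
  obtain ⟨a, b⟩ := p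
  by_cases hm : a ∈ PySem.Set.ofList ws
  · have hmem : a ∈ ws := (PySem.Set.mem_ofList ws a).mp hm
    have hpos : 0 < List.count a ws := List.count_pos_iff.mpr hmem
    simp only [hm, if_pos]
    split_ifs <;> first | rfl | omega
  · have hz : List.count a ws = 0 := by
      rw [List.count_eq_zero]
      exact fun h' => hm ((PySem.Set.mem_ofList ws a).mpr h')
    simp [hm, hz]
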